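-- pv_equiv track=rewrite | github.com/datagora-erasme/smart_watch | core/GenererRapportHTML.py | _calculate_global_stats
-- ===== SOURCE A (Python) =====
-- def _calculate_global_stats(donnees_urls: list) -> dict:
--     """Calcule les statistiques globales."""
--     total_urls = len(donnees_urls)
--
--     # Statistiques de comparaison
--     comparisons_done = len(
--         [u for u in donnees_urls if u.get("horaires_identiques") is not None]
--     )
--     comparisons_identical = len(
--         [u for u in donnees_urls if u.get("horaires_identiques") is True]
--     )
--     comparisons_different = len(
--         [u for u in donnees_urls if u.get("horaires_identiques") is False]
--     )
--     comparisons_not_done = total_urls - comparisons_done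
--
--     return {
--         "total_urls": total_urls,
--         "comparisons_done": comparisons_done,
--         "comparisons_identical": comparisons_identical,
--         "comparisons_different": comparisons_different,
--         "comparisons_not_done": comparisons_not_done,
--     }
-- ===== SOURCE B (Python) =====
-- def _calculate_global_stats(donnees_urls: list) -> dict:
--     done = identical = different = 0
--     for u in donnees_urls:
--         v = u.get("horaires_identiques")
--         if v is not None:
--             done += 1
--             if v is True:
--                 identical += 1
--             elif v is False:
--                 different += 1
--     total_urls = len(donnees_urls)
--     return {
--         "total_urls": total_urls,
--         "comparisons_done": done,
--         "comparisons_identical": identical,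
--         "comparisons_different": different,
--         "comparisons_not_done": total_urls - done,
--     }
-- ===== Notes on version B (the rewrite author's own statement) =====
-- stated objective: simpler
-- what changed: Replaces four separate list-comprehension passes with one loop over donnees_urls maintaining three integer counters.
import Mathlib
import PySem

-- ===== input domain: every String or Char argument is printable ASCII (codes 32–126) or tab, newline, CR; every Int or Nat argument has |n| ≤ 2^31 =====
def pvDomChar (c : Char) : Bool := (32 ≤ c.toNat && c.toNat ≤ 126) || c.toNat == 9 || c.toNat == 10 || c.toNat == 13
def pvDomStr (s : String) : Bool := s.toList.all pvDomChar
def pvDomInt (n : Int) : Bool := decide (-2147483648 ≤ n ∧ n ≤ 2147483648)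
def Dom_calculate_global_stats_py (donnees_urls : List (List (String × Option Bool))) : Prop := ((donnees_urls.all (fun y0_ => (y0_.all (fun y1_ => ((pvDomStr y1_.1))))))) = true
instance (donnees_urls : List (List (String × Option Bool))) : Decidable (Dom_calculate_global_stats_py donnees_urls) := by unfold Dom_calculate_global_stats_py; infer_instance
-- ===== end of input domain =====

-- B replaces A's four separate comprehension passes by a single fold maintaining three counters (objective: simpler).


-- ===== PORT A =====
-- u.get("horaires_identiques"): dict lookup with default None, flattened (missing key and explicit None coincide)
def pvGetHI (u : List (String × Option Bool)) : Option Bool :=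
  (PySem.Dict.get? (PySem.Dict.mk u) "horaires_identiques").getD none

def calculate_global_stats_py (donnees_urls : List (List (String × Option Bool))) : List (String × Int) :=
  let total_urls : Int := donnees_urls.length
  let comparisons_done : Int :=
    (donnees_urls.filter (fun u => (pvGetHI u).isSome)).length
  let comparisons_identical : Int :=
    (donnees_urls.filter (fun u => pvGetHI u == some true)).length
  let comparisons_different : Int :=
    (donnees_urls.filter (fun u => pvGetHI u == some false)).length
  let comparisons_not_done : Int := total_urls - comparisons_done
  [("total_urls", total_urls),
   ("comparisons_done", comparisons_done),
   ("comparisons_identical", comparisons_identical),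
   ("comparisons_different", comparisons_different),
   ("comparisons_not_done", comparisons_not_done)]

-- ===== PORT B =====
-- single pass: accumulate (done, identical, different)
def pvStep (s : Int × Int × Int) (u : List (String × Option Bool)) : Int × Int × Int :=
  match pvGetHI u with
  | none => s
  | some true => (s.1 + 1, s.2.1 + 1, s.2.2)
  | some false => (s.1 + 1, s.2.1, s.2.2 + 1)

def calculate_global_stats_py_alt (donnees_urls : List (List (String × Option Bool))) : List (String × Int) :=
  let c := donnees_urls.foldl pvStep (0, 0, 0)
  let total_urls : Int := donnees_urls.length
  [("total_urls", total_urls),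
   ("comparisons_done", c.1),
   ("comparisons_identical", c.2.1),
   ("comparisons_different", c.2.2),
   ("comparisons_not_done", total_urls - c.1)]

-- ===== PRECONDITION & SPEC =====
def Spec_calculate_global_stats_py (donnees_urls : List (List (String × Option Bool))) (out : List (String × Int)) : Prop := out = calculate_global_stats_py_alt donnees_urls
instance (donnees_urls : List (List (String × Option Bool))) (out : List (String × Int)) : Decidable (Spec_calculate_global_stats_py donnees_urls out) := by unfold Spec_calculate_global_stats_py; infer_instance

-- ===== CLAIM (what is proved, stated in full; the proofs are below) =====
def Claim_equal_calculate_global_stats_py : Prop := ∀ (donnees_urls : List (List (String × Option Bool))), Dom_calculate_global_stats_py donnees_urls → Spec_calculate_global_stats_py donnees_urls (calculate_global_stats_py donnees_urls)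

-- ===== LEMMAS AND PROOFS =====
lemma pvFold_eq (l : List (List (String × Option Bool))) :
    ∀ a b c : Int, l.foldl pvStep (a, b, c) =
      (a + (l.filter (fun u => (pvGetHI u).isSome)).length,
       b + (l.filter (fun u => pvGetHI u == some true)).length,
       c + (l.filter (fun u => pvGetHI u == some false)).length) := by
  induction l with
  | nil => intro a b c; simp
  | cons u t ih =>
    intro a b c
    simp only [List.foldl_cons, List.filter_cons, pvStep]
    rcases pvGetHI u with _ | b'
    · simp [ih]
    · cases b' <;> (simp [ih]; constructor <;> ring)

-- ===== VERDICT (by name: the statement is the Claim_ definition above) =====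
theorem calculate_global_stats_py_spec : Claim_equal_calculate_global_stats_py := by
  intro l _
  unfold Spec_calculate_global_stats_py calculate_global_stats_py calculate_global_stats_py_alt
  rw [pvFold_eq]
  simp
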